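-- pv_equiv track=rewrite | github.com/yuichiinumaru/overpowers | skills/project-assistant/scripts/detector.py | _detect_build_system
-- ===== SOURCE A (Python) =====
-- from typing import Dict, List, Optional, Any, Tuple, Set
--
-- def _detect_build_system(files: List[str]) -> str:
--     """检测构建系统"""
--     build_files = [
--         ('build.gradle.kts', 'gradle'),
--         ('build.gradle', 'gradle'),
--         ('settings.gradle.kts', 'gradle'),
--         ('settings.gradle', 'gradle'),
--         ('pom.xml', 'maven'),
--         ('CMakeLists.txt', 'cmake'),
--         ('Makefile', 'make'),
--         ('makefile', 'make'),
--         ('Android.mk', 'ndk-build'),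
--         ('Android.bp', 'soong'),
--         ('package.json', 'npm'),
--         ('pnpm-lock.yaml', 'pnpm'),
--         ('yarn.lock', 'yarn'),
--         ('Cargo.toml', 'cargo'),
--         ('go.mod', 'go-mod'),
--         ('requirements.txt', 'pip'),
--         ('pyproject.toml', 'poetry'),
--         ('poetry.lock', 'poetry'),
--         ('meson.build', 'meson'),
--         ('BUILD', 'bazel'),
--         ('WORKSPACE', 'bazel'),
--         ('platformio.ini', 'platformio'),
--         ('*.uvprojx', 'keil'),
--         ('*.ewp', 'iar'),
--         ('*.pro', 'qmake'),
--         ('pubspec.yaml', 'flutter'),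
--         ('Podfile', 'cocoapods'),
--         ('Gemfile', 'bundler'),
--         ('composer.json', 'composer'),
--     ]
--
--     files_set = set(files)
--
--     for pattern, build_system in build_files:
--         if pattern.startswith('*'):
--             ext = pattern[1:]
--             if any(f.endswith(ext) for f in files):
--                 return build_system
--         elif pattern in files_set:
--             return build_system
--
--     return 'unknown'
-- ===== SOURCE B (Python) =====
-- from typing import List
--
-- _TABLE = [
--     ('build.gradle.kts', 'gradle'),
--     ('build.gradle', 'gradle'),
--     ('settings.gradle.kts', 'gradle'),
--     ('settings.gradle', 'gradle'),
--     ('pom.xml', 'maven'),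
--     ('CMakeLists.txt', 'cmake'),
--     ('Makefile', 'make'),
--     ('makefile', 'make'),
--     ('Android.mk', 'ndk-build'),
--     ('Android.bp', 'soong'),
--     ('package.json', 'npm'),
--     ('pnpm-lock.yaml', 'pnpm'),
--     ('yarn.lock', 'yarn'),
--     ('Cargo.toml', 'cargo'),
--     ('go.mod', 'go-mod'),
--     ('requirements.txt', 'pip'),
--     ('pyproject.toml', 'poetry'),
--     ('poetry.lock', 'poetry'),
--     ('meson.build', 'meson'),
--     ('BUILD', 'bazel'),
--     ('WORKSPACE', 'bazel'),
--     ('platformio.ini', 'platformio'),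
--     ('*.uvprojx', 'keil'),
--     ('*.ewp', 'iar'),
--     ('*.pro', 'qmake'),
--     ('pubspec.yaml', 'flutter'),
--     ('Podfile', 'cocoapods'),
--     ('Gemfile', 'bundler'),
--     ('composer.json', 'composer'),
-- ]
-- _N = len(_TABLE)
-- _EXACT = {p: i for i, (p, _b) in enumerate(_TABLE) if not p.startswith('*')}
-- _WILD = [(p[1:], i) for i, (p, _b) in enumerate(_TABLE) if p.startswith('*')]
--
--
-- def _detect_build_system(files: List[str]) -> str:
--     """Index-first variant: one pass over files, tracking the minimum pattern priority."""
--     best = _N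
--     for f in files:
--         i = _EXACT.get(f, _N)
--         for suf, j in _WILD:
--             if f.endswith(suf) and j < i:
--                 i = j
--         if i < best:
--             best = i
--     return _TABLE[best][1] if best < _N else 'unknown'
-- ===== Notes on version B (the rewrite author's own statement) =====
-- stated objective: alternative
-- what changed: Replaces the pattern-ordered scan with early return by a precomputed filename->priority-index dict plus a wildcard-suffix list and a single argmin pass over the files, returning the build system of the lowest matched pattern index.
import Mathlib
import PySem

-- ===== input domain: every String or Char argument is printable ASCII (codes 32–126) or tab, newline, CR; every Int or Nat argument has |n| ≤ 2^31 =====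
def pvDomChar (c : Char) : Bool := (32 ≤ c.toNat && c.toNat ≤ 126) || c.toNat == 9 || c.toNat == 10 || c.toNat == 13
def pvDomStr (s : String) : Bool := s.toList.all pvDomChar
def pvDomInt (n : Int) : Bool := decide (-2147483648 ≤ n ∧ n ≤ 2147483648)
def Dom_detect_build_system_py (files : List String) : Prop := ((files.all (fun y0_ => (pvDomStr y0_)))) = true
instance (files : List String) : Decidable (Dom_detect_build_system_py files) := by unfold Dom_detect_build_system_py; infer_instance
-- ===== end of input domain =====

-- B replaces A's pattern-ordered scan with early return by a precomputed exact-name dict /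
-- wildcard-suffix list and a single argmin-over-files pass (objective: alternative).

-- ===== PORT A =====
-- the build_files table (shared literal data of both programs)
def pvTable : List (String × String) := [
  ("build.gradle.kts", "gradle"),
  ("build.gradle", "gradle"),
  ("settings.gradle.kts", "gradle"),
  ("settings.gradle", "gradle"),
  ("pom.xml", "maven"),
  ("CMakeLists.txt", "cmake"),
  ("Makefile", "make"),
  ("makefile", "make"),
  ("Android.mk", "ndk-build"),
  ("Android.bp", "soong"),
  ("package.json", "npm"),
  ("pnpm-lock.yaml", "pnpm"),
  ("yarn.lock", "yarn"),
  ("Cargo.toml", "cargo"),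
  ("go.mod", "go-mod"),
  ("requirements.txt", "pip"),
  ("pyproject.toml", "poetry"),
  ("poetry.lock", "poetry"),
  ("meson.build", "meson"),
  ("BUILD", "bazel"),
  ("WORKSPACE", "bazel"),
  ("platformio.ini", "platformio"),
  ("*.uvprojx", "keil"),
  ("*.ewp", "iar"),
  ("*.pro", "qmake"),
  ("pubspec.yaml", "flutter"),
  ("Podfile", "cocoapods"),
  ("Gemfile", "bundler"),
  ("composer.json", "composer")]

-- the 'for pattern, build_system in build_files:' loop with its two early returns
def pvGoA (files : List String) (files_set : PySem.Set String) : List (String × String) → String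
  | [] => "unknown"
  | (pattern, build_system) :: rest =>
    if PySem.Str.startswith pattern "*" then
      let ext := PySem.Str.slice pattern (some 1) none
      if files.any (fun f => PySem.Str.endswith f ext) then build_system
      else pvGoA files files_set rest
    else if PySem.Set.contains files_set pattern then build_system
    else pvGoA files files_set rest

def detect_build_system_py (files : List String) : String :=
  pvGoA files (PySem.Set.ofList files) pvTable

-- ===== PORT B =====
def pvN : Int := (pvTable.length : Int)

-- _EXACT = {p: i for i, (p, _b) in enumerate(_TABLE) if not p.startswith('*')}
def pvExact : PySem.Dict String Int :=
  (PySem.List.enumerate pvTable).foldl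
    (fun d e => if PySem.Str.startswith e.2.1 "*" then d else PySem.Dict.insert d e.2.1 e.1)
    PySem.Dict.empty

-- _WILD = [(p[1:], i) for i, (p, _b) in enumerate(_TABLE) if p.startswith('*')]
def pvWild : List (String × Int) :=
  (PySem.List.enumerate pvTable).foldl
    (fun acc e => if PySem.Str.startswith e.2.1 "*" then
        acc ++ [(PySem.Str.slice e.2.1 (some 1) none, e.1)] else acc)
    []

-- the inner 'for suf, j in _WILD:' loop, seeded with _EXACT.get(f, _N)
def pvInnerB (f : String) : Int :=
  pvWild.foldl
    (fun i sj => if PySem.Str.endswith f sj.1 && decide (sj.2 < i) then sj.2 else i)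
    (PySem.Dict.getD pvExact f pvN)

def detect_build_system_py_alt (files : List String) : String :=
  let best := files.foldl (fun best f => let i := pvInnerB f; if i < best then i else best) pvN
  if best < pvN then
    match PySem.List.pyGet? pvTable best with
    | some e => e.2
    | none => "unknown"   -- unreachable: the guard gives 0 ≤ best < len(_TABLE)
  else "unknown"

-- ===== PRECONDITION & SPEC =====
def Spec_detect_build_system_py (files : List String) (out : String) : Prop := out = detect_build_system_py_alt files
instance (files : List String) (out : String) : Decidable (Spec_detect_build_system_py files out) := by unfold Spec_detect_build_system_py; infer_instance

-- ===== CLAIM (what is proved, stated in full; the proofs are below) =====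
def Claim_equal_detect_build_system_py : Prop := ∀ (files : List String), Dom_detect_build_system_py files → Spec_detect_build_system_py files (detect_build_system_py files)

-- ===== LEMMAS AND PROOFS =====

-- per-file match of one table entry
def pvPmf (e : String × String) (f : String) : Bool :=
  if PySem.Str.startswith e.1 "*" then
    PySem.Str.endswith f (PySem.Str.slice e.1 (some 1) none)
  else f == e.1

-- whole-file-list match of one table entry (the condition A's scan tests)
def pvPm (e : String × String) (files : List String) : Bool := files.any (fun f => pvPmf e f)

-- index (as Int) of the first entry satisfying p, or the length if none
def pvIfind {α : Type} (p : α → Bool) : List α → Int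
  | [] => 0
  | x :: t => if p x then 0 else 1 + pvIfind p t

lemma pvIfind_nonneg {α : Type} (p : α → Bool) (l : List α) : 0 ≤ pvIfind p l := by
  induction l with
  | nil => simp [pvIfind]
  | cons x t ih => simp only [pvIfind]; split <;> omega

lemma pvIfind_le_length {α : Type} (p : α → Bool) (l : List α) : pvIfind p l ≤ (l.length : Int) := by
  induction l with
  | nil => simp [pvIfind]
  | cons x t ih =>
    simp only [pvIfind, List.length_cons]
    split <;> omega

lemma pvIfind_false {α : Type} (l : List α) : pvIfind (fun _ => false) l = (l.length : Int) := by
  induction l with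
  | nil => simp [pvIfind]
  | cons x t ih => simp [pvIfind, ih]; omega

lemma pvIfind_or {α : Type} (p q : α → Bool) (l : List α) :
    pvIfind (fun x => p x || q x) l = min (pvIfind p l) (pvIfind q l) := by
  induction l with
  | nil => simp [pvIfind]
  | cons x t ih =>
    have hp := pvIfind_nonneg p t
    have hq := pvIfind_nonneg q t
    simp only [pvIfind, ih]
    cases hpx : p x <;> cases hqx : q x <;> simp <;> omega

lemma pvIfind_any {α : Type} (q : α → String → Bool) (t : List α) (fs : List String) :
    pvIfind (fun e => fs.any (fun f => q e f)) t
      = fs.foldr (fun f a => min (pvIfind (fun e => q e f) t) a) (t.length : Int) := by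
  induction fs with
  | nil => simp [pvIfind_false]
  | cons f fs ih => simp only [List.any_cons, List.foldr_cons, pvIfind_or, ih]

-- A's value as a table lookup at an index
def pvOutI (t : List (String × String)) (k : Int) : String :=
  match PySem.List.pyGet? t k with
  | some e => e.2
  | none => "unknown"

lemma pvPyGet?_cons_one_add {α : Type} (x : α) (t : List α) (k : Int) (hk : 0 ≤ k) :
    PySem.List.pyGet? (x :: t) (1 + k) = PySem.List.pyGet? t k := by
  rw [PySem.List.pyGet?_of_nonneg (x :: t) (by omega), PySem.List.pyGet?_of_nonneg t hk]
  have : (1 + k).toNat = k.toNat + 1 := by omega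
  simp [this]

lemma pvGoA_eq_outI (fs : List String) (fset : PySem.Set String)
    (hset : ∀ p, PySem.Set.contains fset p = fs.any (fun f => f == p)) :
    ∀ t, pvGoA fs fset t = pvOutI t (pvIfind (fun e => pvPm e fs) t) := by
  intro t
  induction t with
  | nil => simp [pvGoA, pvOutI, pvIfind, PySem.List.pyGet?]
  | cons e rest ih =>
    obtain ⟨pat, bs⟩ := e
    by_cases hw : PySem.Str.startswith pat "*"
    · by_cases hhit : fs.any (fun f => PySem.Str.endswith f (PySem.Str.slice pat (some 1) none)) = true
      · have hpm : pvPm (pat, bs) fs = true := by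
          simp only [pvPm, pvPmf, hw, if_true]; exact hhit
        simp only [pvGoA]
        rw [if_pos hw, if_pos hhit]
        simp [pvIfind, hpm, pvOutI]
      · have hpm : pvPm (pat, bs) fs = false := by
          simp only [pvPm, pvPmf, hw, if_true]; simpa using hhit
        have hnn := pvIfind_nonneg (fun e => pvPm e fs) rest
        simp only [pvGoA]
        rw [if_pos hw, if_neg hhit, ih]
        simp [pvIfind, hpm, pvOutI, pvPyGet?_cons_one_add _ _ _ hnn]
    · by_cases hmem : fs.any (fun f => f == pat) = true
      · have hpm : pvPm (pat, bs) fs = true := by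
          simp only [pvPm, pvPmf, hw]; exact hmem
        simp only [pvGoA]
        rw [if_neg hw, hset pat, if_pos hmem]
        simp [pvIfind, hpm, pvOutI]
      · have hpm : pvPm (pat, bs) fs = false := by
          simp only [pvPm, pvPmf, hw]
          simp only [Bool.not_eq_true] at hmem; exact hmem
        have hnn := pvIfind_nonneg (fun e => pvPm e fs) rest
        simp only [pvGoA]
        rw [if_neg hw, hset pat, if_neg hmem, ih]
        simp [pvIfind, hpm, pvOutI, pvPyGet?_cons_one_add _ _ _ hnn]

set_option maxHeartbeats 4000000 in
lemma pvInnerB_eq_nokey (f : String) (h1 : f ≠ "build.gradle.kts") (h2 : f ≠ "build.gradle") (h3 : f ≠ "settings.gradle.kts") (h4 : f ≠ "settings.gradle") (h5 : f ≠ "pom.xml") (h6 : f ≠ "CMakeLists.txt") (h7 : f ≠ "Makefile") (h8 : f ≠ "makefile") (h9 : f ≠ "Android.mk") (h10 : f ≠ "Android.bp") (h11 : f ≠ "package.json") (h12 : f ≠ "pnpm-lock.yaml") (h13 : f ≠ "yarn.lock") (h14 : f ≠ "Cargo.toml") (h15 : f ≠ "go.mod") (h16 : f ≠ "requirements.txt")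 (h17 : f ≠ "pyproject.toml") (h18 : f ≠ "poetry.lock") (h19 : f ≠ "meson.build") (h20 : f ≠ "BUILD") (h21 : f ≠ "WORKSPACE") (h22 : f ≠ "platformio.ini") (h23 : f ≠ "pubspec.yaml") (h24 : f ≠ "Podfile") (h25 : f ≠ "Gemfile") (h26 : f ≠ "composer.json") :
    pvInnerB f = pvIfind (fun e => pvPmf e f) pvTable := by
  have e0 : pvPmf ("build.gradle.kts","gradle") f = (f == "build.gradle.kts") := by
    simp [pvPmf, show PySem.Chars.startswith ['b','u','i','l','d','.','g','r','a','d','l','e','.','k','t','s'] ['*'] = false from by decide]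
  have e1 : pvPmf ("build.gradle","gradle") f = (f == "build.gradle") := by
    simp [pvPmf, show PySem.Chars.startswith ['b','u','i','l','d','.','g','r','a','d','l','e'] ['*'] = false from by decide]
  have e2 : pvPmf ("settings.gradle.kts","gradle") f = (f == "settings.gradle.kts") := by
    simp [pvPmf, show PySem.Chars.startswith ['s','e','t','t','i','n','g','s','.','g','r','a','d','l','e','.','k','t','s'] ['*'] = false from by decide]
  have e3 : pvPmf ("settings.gradle","gradle") f = (f == "settings.gradle") := by
    simp [pvPmf, show PySem.Chars.startswith ['s','e','t','t','i','n','g','s','.','g','r','a','d','l','e'] ['*'] = false from by decide]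
  have e4 : pvPmf ("pom.xml","maven") f = (f == "pom.xml") := by
    simp [pvPmf, show PySem.Chars.startswith ['p','o','m','.','x','m','l'] ['*'] = false from by decide]
  have e5 : pvPmf ("CMakeLists.txt","cmake") f = (f == "CMakeLists.txt") := by
    simp [pvPmf, show PySem.Chars.startswith ['C','M','a','k','e','L','i','s','t','s','.','t','x','t'] ['*'] = false from by decide]
  have e6 : pvPmf ("Makefile","make") f = (f == "Makefile") := by
    simp [pvPmf, show PySem.Chars.startswith ['M','a','k','e','f','i','l','e'] ['*'] = false from by decide]
  have e7 : pvPmf ("makefile","make") f = (f == "makefile") := by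
    simp [pvPmf, show PySem.Chars.startswith ['m','a','k','e','f','i','l','e'] ['*'] = false from by decide]
  have e8 : pvPmf ("Android.mk","ndk-build") f = (f == "Android.mk") := by
    simp [pvPmf, show PySem.Chars.startswith ['A','n','d','r','o','i','d','.','m','k'] ['*'] = false from by decide]
  have e9 : pvPmf ("Android.bp","soong") f = (f == "Android.bp") := by
    simp [pvPmf, show PySem.Chars.startswith ['A','n','d','r','o','i','d','.','b','p'] ['*'] = false from by decide]
  have e10 : pvPmf ("package.json","npm") f = (f == "package.json") := by
    simp [pvPmf, show PySem.Chars.startswith ['p','a','c','k','a','g','e','.','j','s','o','n'] ['*'] = false from by decide]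
  have e11 : pvPmf ("pnpm-lock.yaml","pnpm") f = (f == "pnpm-lock.yaml") := by
    simp [pvPmf, show PySem.Chars.startswith ['p','n','p','m','-','l','o','c','k','.','y','a','m','l'] ['*'] = false from by decide]
  have e12 : pvPmf ("yarn.lock","yarn") f = (f == "yarn.lock") := by
    simp [pvPmf, show PySem.Chars.startswith ['y','a','r','n','.','l','o','c','k'] ['*'] = false from by decide]
  have e13 : pvPmf ("Cargo.toml","cargo") f = (f == "Cargo.toml") := by
    simp [pvPmf, show PySem.Chars.startswith ['C','a','r','g','o','.','t','o','m','l'] ['*'] = false from by decide]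
  have e14 : pvPmf ("go.mod","go-mod") f = (f == "go.mod") := by
    simp [pvPmf, show PySem.Chars.startswith ['g','o','.','m','o','d'] ['*'] = false from by decide]
  have e15 : pvPmf ("requirements.txt","pip") f = (f == "requirements.txt") := by
    simp [pvPmf, show PySem.Chars.startswith ['r','e','q','u','i','r','e','m','e','n','t','s','.','t','x','t'] ['*'] = false from by decide]
  have e16 : pvPmf ("pyproject.toml","poetry") f = (f == "pyproject.toml") := by
    simp [pvPmf, show PySem.Chars.startswith ['p','y','p','r','o','j','e','c','t','.','t','o','m','l'] ['*'] = false from by decide]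
  have e17 : pvPmf ("poetry.lock","poetry") f = (f == "poetry.lock") := by
    simp [pvPmf, show PySem.Chars.startswith ['p','o','e','t','r','y','.','l','o','c','k'] ['*'] = false from by decide]
  have e18 : pvPmf ("meson.build","meson") f = (f == "meson.build") := by
    simp [pvPmf, show PySem.Chars.startswith ['m','e','s','o','n','.','b','u','i','l','d'] ['*'] = false from by decide]
  have e19 : pvPmf ("BUILD","bazel") f = (f == "BUILD") := by
    simp [pvPmf, show PySem.Chars.startswith ['B','U','I','L','D'] ['*'] = false from by decide]
  have e20 : pvPmf ("WORKSPACE","bazel") f = (f == "WORKSPACE") := by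
    simp [pvPmf, show PySem.Chars.startswith ['W','O','R','K','S','P','A','C','E'] ['*'] = false from by decide]
  have e21 : pvPmf ("platformio.ini","platformio") f = (f == "platformio.ini") := by
    simp [pvPmf, show PySem.Chars.startswith ['p','l','a','t','f','o','r','m','i','o','.','i','n','i'] ['*'] = false from by decide]
  have e22 : pvPmf ("*.uvprojx","keil") f = PySem.Str.endswith f ".uvprojx" := by
    simp [pvPmf, show PySem.Chars.startswith ['*','.','u','v','p','r','o','j','x'] ['*'] = true from by decide,
      show PySem.List.slice ['*','.','u','v','p','r','o','j','x'] (some 1) none = ['.','u','v','p','r','o','j','x'] from by decide]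
  have e23 : pvPmf ("*.ewp","iar") f = PySem.Str.endswith f ".ewp" := by
    simp [pvPmf, show PySem.Chars.startswith ['*','.','e','w','p'] ['*'] = true from by decide,
      show PySem.List.slice ['*','.','e','w','p'] (some 1) none = ['.','e','w','p'] from by decide]
  have e24 : pvPmf ("*.pro","qmake") f = PySem.Str.endswith f ".pro" := by
    simp [pvPmf, show PySem.Chars.startswith ['*','.','p','r','o'] ['*'] = true from by decide,
      show PySem.List.slice ['*','.','p','r','o'] (some 1) none = ['.','p','r','o'] from by decide]
  have e25 : pvPmf ("pubspec.yaml","flutter") f = (f == "pubspec.yaml") := by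
    simp [pvPmf, show PySem.Chars.startswith ['p','u','b','s','p','e','c','.','y','a','m','l'] ['*'] = false from by decide]
  have e26 : pvPmf ("Podfile","cocoapods") f = (f == "Podfile") := by
    simp [pvPmf, show PySem.Chars.startswith ['P','o','d','f','i','l','e'] ['*'] = false from by decide]
  have e27 : pvPmf ("Gemfile","bundler") f = (f == "Gemfile") := by
    simp [pvPmf, show PySem.Chars.startswith ['G','e','m','f','i','l','e'] ['*'] = false from by decide]
  have e28 : pvPmf ("composer.json","composer") f = (f == "composer.json") := by
    simp [pvPmf, show PySem.Chars.startswith ['c','o','m','p','o','s','e','r','.','j','s','o','n'] ['*'] = false from by decide]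
  have hE : pvExact = (PySem.Dict.insert (PySem.Dict.insert (PySem.Dict.insert (PySem.Dict.insert (PySem.Dict.insert (PySem.Dict.insert (PySem.Dict.insert (PySem.Dict.insert (PySem.Dict.insert (PySem.Dict.insert (PySem.Dict.insert (PySem.Dict.insert (PySem.Dict.insert (PySem.Dict.insert (PySem.Dict.insert (PySem.Dict.insert (PySem.Dict.insert (PySem.Dict.insert (PySem.Dict.insert (PySem.Dict.insert (PySem.Dict.insert (PySem.Dict.insert (PySem.Dict.insert (PySem.Dict.insert (PySem.Dict.insert (PySem.Dict.insert (PySem.Dict.empty : PySem.Dict String Int) "build.gradle.kts" 0) "build.gradle" 1) "settings.gradle.kts" 2) "settings.gradle" 3) "pom.xml" 4) "CMakeLists.txt" 5) "Makefile" 6) "makefile" 7) "Android.mk" 8) "Android.bp" 9) "package.json" 10) "pnpm-lock.yaml" 11) "yarn.lock" 12) "Cargo.toml" 13) "go.mod" 14) "requirements.txt" 15) "pyproject.toml" 16) "poetry.lock" 17) "meson.build" 18) "BUILD" 19) "WORKSPACE" 20) "platformio.ini" 21) "pubspec.yaml" 25) "Podfile" 26) "Gemfile" 27) "composer.json" 28)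 := by decide
  have hW : pvWild = [(".uvprojx", 22), (".ewp", 23), (".pro", 24)] := by decide
  by_cases w1 : PySem.Chars.endswith f.toList ['.','u','v','p','r','o','j','x'] <;>
  by_cases w2 : PySem.Chars.endswith f.toList ['.','e','w','p'] <;>
  by_cases w3 : PySem.Chars.endswith f.toList ['.','p','r','o'] <;>
  simp [pvInnerB, hE, hW, pvN, pvTable, pvIfind, e0,e1,e2,e3,e4,e5,e6,e7,e8,e9,e10,e11,e12,e13,e14,e15,e16,e17,e18,e19,e20,e21,e22,e23,e24,e25,e26,e27,e28,
      PySem.Dict.getD_insert, h1,h2,h3,h4,h5,h6,h7,h8,h9,h10,h11,h12,h13,h14,h15,h16,h17,h18,h19,h20,h21,h22,h23,h24,h25,h26, w1, w2, w3]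

-- per-file: B's inner loop computes the first table index matching f
set_option maxHeartbeats 4000000 in
lemma pvInnerB_eq (f : String) : pvInnerB f = pvIfind (fun e => pvPmf e f) pvTable := by
  by_cases h1 : f = "build.gradle.kts"
  · subst h1; decide
  by_cases h2 : f = "build.gradle"
  · subst h2; decide
  by_cases h3 : f = "settings.gradle.kts"
  · subst h3; decide
  by_cases h4 : f = "settings.gradle"
  · subst h4; decide
  by_cases h5 : f = "pom.xml"
  · subst h5; decide
  by_cases h6 : f = "CMakeLists.txt"
  · subst h6; decide
  by_cases h7 : f = "Makefile"
  · subst h7; decide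
  by_cases h8 : f = "makefile"
  · subst h8; decide
  by_cases h9 : f = "Android.mk"
  · subst h9; decide
  by_cases h10 : f = "Android.bp"
  · subst h10; decide
  by_cases h11 : f = "package.json"
  · subst h11; decide
  by_cases h12 : f = "pnpm-lock.yaml"
  · subst h12; decide
  by_cases h13 : f = "yarn.lock"
  · subst h13; decide
  by_cases h14 : f = "Cargo.toml"
  · subst h14; decide
  by_cases h15 : f = "go.mod"
  · subst h15; decide
  by_cases h16 : f = "requirements.txt"
  · subst h16; decide
  by_cases h17 : f = "pyproject.toml"
  · subst h17; decide
  by_cases h18 : f = "poetry.lock"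
  · subst h18; decide
  by_cases h19 : f = "meson.build"
  · subst h19; decide
  by_cases h20 : f = "BUILD"
  · subst h20; decide
  by_cases h21 : f = "WORKSPACE"
  · subst h21; decide
  by_cases h22 : f = "platformio.ini"
  · subst h22; decide
  by_cases h23 : f = "pubspec.yaml"
  · subst h23; decide
  by_cases h24 : f = "Podfile"
  · subst h24; decide
  by_cases h25 : f = "Gemfile"
  · subst h25; decide
  by_cases h26 : f = "composer.json"
  · subst h26; decide
  exact pvInnerB_eq_nokey f h1 h2 h3 h4 h5 h6 h7 h8 h9 h10 h11 h12 h13 h14 h15 h16 h17 h18 h19 h20 h21 h22 h23 h24 h25 h26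

lemma pvInnerB_bounds (f : String) : 0 ≤ pvInnerB f ∧ pvInnerB f ≤ 29 := by
  rw [pvInnerB_eq]
  exact ⟨pvIfind_nonneg _ _, le_trans (pvIfind_le_length _ _) (by norm_num [pvTable])⟩

-- B's outer fold as min of the per-file foldr
lemma pvFoldB (fs : List String) : ∀ b : Int, b ≤ 29 →
    fs.foldl (fun best f => let i := pvInnerB f; if i < best then i else best) b
      = min b (fs.foldr (fun f a => min (pvInnerB f) a) 29) := by
  induction fs with
  | nil => intro b hb; simp; omega
  | cons f fs ih =>
    intro b hb
    have hf := pvInnerB_bounds f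
    simp only [List.foldl_cons, List.foldr_cons]
    rw [ih _ (by split <;> omega)]
    split <;> omega

lemma pvFoldr_le (fs : List String) : fs.foldr (fun f a => min (pvInnerB f) a) 29 ≤ 29 := by
  induction fs with
  | nil => simp
  | cons f fs ih => simp only [List.foldr_cons]; omega

lemma pvFoldr_nonneg (fs : List String) : 0 ≤ fs.foldr (fun f a => min (pvInnerB f) a) 29 := by
  induction fs with
  | nil => simp
  | cons f fs ih => have := pvInnerB_bounds f; simp only [List.foldr_cons]; omega

lemma pvContains_ofList (fs : List String) (p : String) :
    PySem.Set.contains (PySem.Set.ofList fs) p = fs.any (fun f => f == p) := by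
  simp only [PySem.Set.contains_eq_listContains, List.contains_eq_mem, PySem.Set.mem_ofList,
    List.any_beq']

lemma pvN_eq : pvN = 29 := by norm_num [pvN, pvTable]

-- ===== VERDICT (by name: the statement is the Claim_ definition above) =====
theorem detect_build_system_py_spec : Claim_equal_detect_build_system_py := by
  intro files _
  unfold Spec_detect_build_system_py
  rw [detect_build_system_py, pvGoA_eq_outI files _ (pvContains_ofList files) pvTable]
  have htab : ((pvTable.length : Nat) : Int) = 29 := by norm_num [pvTable]
  rw [show pvIfind (fun e => pvPm e files) pvTable
        = files.foldr (fun f a => min (pvIfind (fun e => pvPmf e f) pvTable) a) 29 from by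
      simpa only [pvPm, htab] using pvIfind_any pvPmf pvTable files]
  show _ = detect_build_system_py_alt files
  unfold detect_build_system_py_alt
  rw [pvFoldB files pvN (by rw [pvN_eq])]
  simp only [← pvInnerB_eq]
  set R := files.foldr (fun f a => min (pvInnerB f) a) 29 with hR
  have hle : R ≤ 29 := pvFoldr_le files
  have hge : 0 ≤ R := pvFoldr_nonneg files
  have hmin : min pvN R = R := by rw [pvN_eq]; omega
  rw [hmin]
  by_cases h : R < pvN
  · rw [if_pos h, pvOutI]
  · rw [if_neg h]
    have h29 : R = 29 := by rw [pvN_eq] at h; omega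
    rw [h29]
    decide
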